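-- pv_equiv track=rewrite | github.com/nobishino/AtCoder | ABC/141/ER.py | check
-- ===== SOURCE A (Python) =====
-- MOD = pow(2,61) - 1
--
-- def charToNum(char):
--     return ord(char) - 96
--
-- def check(string,subLen):
--     if subLen == 0: return True
--     #長さsubLenの部分文字列すべてについてローリングハッシュを計算して、
--     #一致するものがあるかどうかを計算する。
--     # setOfRollingHash = set()
--     dictOfRollingHash = {}
--     totalLen = len(string)
--     h = 0
--     b = 1
--     for i in range(subLen):
--         c = string[subLen - 1 - i]
--         h += charToNum(c) * b
--         b *= 27
--         b %= MOD
--     h %= MOD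
--     dictOfRollingHash[h] = 0
--     maxBase = pow(27,subLen - 1,MOD)
--     for i in range(1,totalLen - subLen + 1):
--         h -= maxBase * charToNum(string[i - 1])
--         h *= 27
--         h += charToNum(string[i + subLen - 1])
--         h %= MOD
--         if h in dictOfRollingHash:
--             if i - dictOfRollingHash[h] >= subLen:
--                 return True
--         else:
--             dictOfRollingHash[h] = i
--     return False
-- ===== SOURCE B (Python) =====
-- MOD = pow(2, 61) - 1
--
-- def check(string, subLen):
--     if subLen == 0:
--         return True
--     n = len(string)
--     # prefix polynomial hashes of string[:k] for k = 0..n, same base 27 / modulus as A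
--     H = [0]
--     acc = 0
--     for ch in string:
--         acc = (acc * 27 + ord(ch) - 96) % MOD
--         H.append(acc)
--     p = pow(27, subLen, MOD)
--     # hash of the first window (H[subLen] raises IndexError when subLen > n, as slicing-free indexing should)
--     earliest = {(H[subLen] - H[0] * p) % MOD: 0}
--     for i in range(1, n - subLen + 1):
--         wh = (H[i + subLen] - H[i] * p) % MOD
--         if wh in earliest:
--             if i - earliest[wh] >= subLen:
--                 return True
--         else:
--             earliest[wh] = i
--     return False
-- ===== Notes on version B (the rewrite author's own statement) =====
-- stated objective: alternative
-- what changed: Replaces A's per-window rolling-hash recurrence (build the first hash char by char, then subtract the leading char times a max power, shift and add per step) by a precomputed prefix-hash table with the same base 27 and modulus 2^61-1, so every window hash, including the seeded first one, is a single subtraction H[i+subLen]-H[i]*27^subLen; the dict of earliest hash occurrences is kept.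
import Mathlib
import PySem

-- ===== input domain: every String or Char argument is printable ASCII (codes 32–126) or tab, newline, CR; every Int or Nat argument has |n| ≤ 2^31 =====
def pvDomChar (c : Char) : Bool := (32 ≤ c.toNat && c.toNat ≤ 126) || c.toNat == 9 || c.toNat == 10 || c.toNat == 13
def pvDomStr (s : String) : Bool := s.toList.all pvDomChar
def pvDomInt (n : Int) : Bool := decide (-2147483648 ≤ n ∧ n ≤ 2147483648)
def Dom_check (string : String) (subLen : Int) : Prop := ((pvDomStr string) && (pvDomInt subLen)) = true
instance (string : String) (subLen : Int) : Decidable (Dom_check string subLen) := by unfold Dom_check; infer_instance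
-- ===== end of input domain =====

-- B replaces A's rolling-hash recurrence by precomputed prefix hashes (same base 27, same modulus
-- 2^61-1), so each window hash is one subtraction of two prefix hashes; objective: alternative decomposition.

-- ===== PORT A =====
def pvMOD : Int := 2 ^ 61 - 1

def charToNum (c : Char) : Int := (c.toNat : Int) - 96

-- A's first loop: builds (h, b) over range(subLen)
def initHB (cs : List Char) (subLen : Int) : Int × Int :=
  (PySem.List.pyRange 0 subLen 1).foldl
    (fun hb i =>
      (hb.1 + charToNum (PySem.List.pyGetD cs (subLen - 1 - i) ' ') * hb.2,
       PySem.Int.mod (hb.2 * 27) pvMOD))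
    (0, 1)

-- A's second loop, with the early return
def checkLoopA (cs : List Char) (subLen maxBase : Int) :
    List Int → Int → PySem.Dict Int Int → Bool
  | [], _, _ => false
  | i :: rest, h, d =>
    let h' := PySem.Int.mod
      ((h - maxBase * charToNum (PySem.List.pyGetD cs (i - 1) ' ')) * 27
        + charToNum (PySem.List.pyGetD cs (i + subLen - 1) ' ')) pvMOD
    match d.get? h' with
    | some e => if subLen ≤ i - e then true else checkLoopA cs subLen maxBase rest h' d
    | none => checkLoopA cs subLen maxBase rest h' (d.insert h' i)

def check (string : String) (subLen : Int) : Bool :=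
  if subLen == 0 then true
  else
    let cs := string.toList
    let totalLen : Int := PySem.Str.len string
    let hb := initHB cs subLen
    let h := PySem.Int.mod hb.1 pvMOD
    let d : PySem.Dict Int Int := PySem.Dict.empty.insert h 0
    let maxBase := PySem.Int.powMod 27 (subLen - 1).toNat pvMOD
    checkLoopA cs subLen maxBase (PySem.List.pyRange 1 (totalLen - subLen + 1) 1) h d

def checkLoopB (H : List Int) (subLen p : Int) :
    List Int → PySem.Dict Int Int → Bool
  | [], _ => false
  | i :: rest, d =>
    let wh := PySem.Int.mod
      (PySem.List.pyGetD H (i + subLen) 0 - PySem.List.pyGetD H i 0 * p) pvMOD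
    match d.get? wh with
    | some e => if subLen ≤ i - e then true else checkLoopB H subLen p rest d
    | none => checkLoopB H subLen p rest (d.insert wh i)

def check_alt (string : String) (subLen : Int) : Bool :=
  if subLen == 0 then true
  else
    let cs := string.toList
    let n : Int := PySem.Str.len string
    let Hacc := cs.foldl
      (fun (s : List Int × Int) ch =>
        let acc := PySem.Int.mod (s.2 * 27 + ((ch.toNat : Int) - 96)) pvMOD
        (s.1 ++ [acc], acc)) ([0], 0)
    let p := PySem.Int.powMod 27 subLen.toNat pvMOD
    -- earliest = {(H[subLen] - H[0]*p) % MOD: 0}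
    let seed := PySem.Int.mod
      (PySem.List.pyGetD Hacc.1 subLen 0 - PySem.List.pyGetD Hacc.1 0 0 * p) pvMOD
    checkLoopB Hacc.1 subLen p (PySem.List.pyRange 1 (n - subLen + 1) 1)
      (PySem.Dict.empty.insert seed 0)


-- ===== PRECONDITION & SPEC =====
-- Pre_ is exactly the inputs on which the Python A returns: outside 0 ≤ subLen ≤ len(string)
-- A raises IndexError in one of its indexing loops (subLen = 0 returns early and is inside Pre_).
def Pre_check (string : String) (subLen : Int) : Prop :=
  0 ≤ subLen ∧ subLen ≤ PySem.Str.len string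
instance (string : String) (subLen : Int) : Decidable (Pre_check string subLen) := by
  unfold Pre_check; infer_instance

def pvWitness_check : String × Int := ("abcab", 2)

def Spec_check (string : String) (subLen : Int) (out : Bool) : Prop := out = check_alt string subLen
instance (string : String) (subLen : Int) (out : Bool) : Decidable (Spec_check string subLen out) := by
  unfold Spec_check; infer_instance

-- ===== CLAIM (what is proved, stated in full; the proofs are below) =====
def Claim_equal_check : Prop := ∀ (string : String) (subLen : Int), Dom_check string subLen → Pre_check string subLen → Spec_check string subLen (check string subLen)

-- ===== LEMMAS AND PROOFS =====

-- unreduced polynomial hash (base 27, most significant character first)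
def pstep (a : Int) (c : Char) : Int := a * 27 + charToNum c
def poly (xs : List Char) : Int := xs.foldl pstep 0
-- the per-step-reduced prefix hash that B's accumulator computes
def mstep (a : Int) (c : Char) : Int := PySem.Int.mod (a * 27 + charToNum c) pvMOD
def mpoly (xs : List Char) : Int := xs.foldl mstep 0
-- the canonical reduced hash of the length-L window starting at i
def hseq (cs : List Char) (L i : Nat) : Int := poly ((cs.drop i).take L) % pvMOD

-- the common shape of both dict scans: a list of (index, window hash) pairs
def scanD (subLen : Int) : List (Int × Int) → PySem.Dict Int Int → Bool
  | [], _ => false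
  | (i, h) :: rest, d =>
    match d.get? h with
    | some e => if subLen ≤ i - e then true else scanD subLen rest d
    | none => scanD subLen rest (d.insert h i)

theorem pvMOD_pos : (0:Int) < pvMOD := by norm_num [pvMOD]

theorem poly_foldl_from (xs : List Char) : ∀ a : Int, xs.foldl pstep a = a * 27 ^ xs.length + poly xs := by
  induction xs with
  | nil => intro a; simp [poly]
  | cons c xs ih =>
    intro a
    simp only [List.foldl_cons, List.length_cons, poly] at *
    rw [ih (pstep a c), ih (pstep 0 c)]
    simp [pstep]; ring

theorem poly_append (xs ys : List Char) : poly (xs ++ ys) = poly xs * 27 ^ ys.length + poly ys := by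
  unfold poly
  rw [List.foldl_append]
  exact poly_foldl_from ys _

theorem poly_cons (c : Char) (xs : List Char) : poly (c :: xs) = charToNum c * 27 ^ xs.length + poly xs := by
  have := poly_append [c] xs
  simpa [poly, pstep] using this

theorem emod_self_modeq (a : Int) : a % pvMOD ≡ a [ZMOD pvMOD] :=
  Int.emod_emod_of_dvd a dvd_rfl

theorem mpoly_foldl (xs : List Char) : ∀ a : Int, xs.foldl mstep (a % pvMOD) = (xs.foldl pstep a) % pvMOD := by
  induction xs with
  | nil => intro a; simp
  | cons c xs ih =>
    intro a
    simp only [List.foldl_cons]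
    have hstep : mstep (a % pvMOD) c = (pstep a c) % pvMOD := by
      simp only [mstep, pstep, PySem.Int.mod_eq_emod_of_pos pvMOD_pos]
      exact ((emod_self_modeq a).mul_right 27).add_right (charToNum c)
    rw [hstep, ih (pstep a c)]

theorem mpoly_eq (xs : List Char) : mpoly xs = poly xs % pvMOD := by
  have := mpoly_foldl xs 0
  simpa [mpoly, poly] using this

theorem Hfold_spec (cs : List Char) :
    (cs.foldl (fun (s : List Int × Int) ch =>
        let acc := PySem.Int.mod (s.2 * 27 + ((ch.toNat : Int) - 96)) pvMOD
        (s.1 ++ [acc], acc)) ([0], 0)) =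
      ((List.range (cs.length + 1)).map (fun k => mpoly (cs.take k)), mpoly cs) := by
  induction cs using List.reverseRecOn with
  | nil => simp [mpoly]
  | append_singleton ds c ih =>
    rw [List.foldl_append, ih]
    simp only [List.foldl_cons, List.foldl_nil]
    have hacc : PySem.Int.mod (mpoly ds * 27 + ((c.toNat : Int) - 96)) pvMOD = mpoly (ds ++ [c]) := by
      simp [mpoly, List.foldl_append, mstep, charToNum]
    rw [hacc]
    have hmap : List.map (fun k => mpoly (List.take k (ds ++ [c]))) (List.range ((ds ++ [c]).length + 1))
        = List.map (fun k => mpoly (List.take k ds)) (List.range (ds.length + 1)) ++ [mpoly (ds ++ [c])] := by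
      rw [List.length_append, List.length_singleton, List.range_succ, List.map_append]
      congr 1
      · apply List.map_congr_left
        intro k hk
        rw [List.mem_range] at hk
        rw [List.take_append_of_le_length (by omega)]
      · simp [List.take_of_length_le (by simp : (ds ++ [c]).length ≤ ds.length + 1)]
    rw [hmap]

theorem init_aux (cs : List Char) (L : Nat) (hLn : L ≤ cs.length) : ∀ t : Nat, t ≤ L →
    ((PySem.List.pyRange 0 (t:Int) 1).foldl
      (fun hb i => (hb.1 + charToNum (PySem.List.pyGetD cs ((L:Int) - 1 - i) ' ') * hb.2,
                    PySem.Int.mod (hb.2 * 27) pvMOD)) ((0:Int), (1:Int))).2 = 27 ^ t % pvMOD ∧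
    ((PySem.List.pyRange 0 (t:Int) 1).foldl
      (fun hb i => (hb.1 + charToNum (PySem.List.pyGetD cs ((L:Int) - 1 - i) ' ') * hb.2,
                    PySem.Int.mod (hb.2 * 27) pvMOD)) ((0:Int), (1:Int))).1 % pvMOD
      = poly ((cs.drop (L - t)).take t) % pvMOD := by
  intro t
  induction t with
  | zero =>
    intro _
    rw [PySem.List.pyRange_one_eq_nil (by norm_num)]
    refine ⟨by norm_num [pvMOD], by simp [poly]⟩
  | succ t ih =>
    intro hts
    obtain ⟨hb, hh⟩ := ih (by omega)
    have hcast : ((t + 1 : Nat) : Int) = (t : Int) + 1 := by push_cast; ring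
    rw [hcast, PySem.List.pyRange_one_succ_right (by positivity), List.foldl_append,
      List.foldl_cons, List.foldl_nil]
    have hidx : ((L:Int) - 1 - (t:Int)).toNat = L - 1 - t := by omega
    have hget : PySem.List.pyGetD cs ((L:Int) - 1 - (t:Int)) ' ' = cs[L - 1 - t]'(by omega) := by
      rw [PySem.List.pyGetD_eq_getElem cs ' ' (by omega) (by omega)]
      simp [hidx]
    have hlen_old : ((cs.drop (L - t)).take t).length = t := by
      simp [List.length_take, List.length_drop]; omega
    have hdropstep : cs.drop (L - (t+1)) = cs[L - 1 - t]'(by omega) :: cs.drop (L - t) := by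
      have h1 : L - (t+1) = L - 1 - t := by omega
      have h2 : L - 1 - t + 1 = L - t := by omega
      rw [h1, List.drop_eq_getElem_cons (by omega), h2]
    have hnew : poly ((cs.drop (L - (t+1))).take (t+1))
        = charToNum (cs[L - 1 - t]'(by omega)) * 27 ^ t + poly ((cs.drop (L - t)).take t) := by
      rw [hdropstep, List.take_succ_cons, poly_cons, hlen_old]
    constructor
    · simp only [hb]
      rw [PySem.Int.mod_eq_emod_of_pos pvMOD_pos, pow_succ]
      exact (emod_self_modeq (27 ^ t)).mul_right 27
    · simp only [hb, hget, hnew]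
      have hmeq : _root_.Int.ModEq pvMOD
          (((PySem.List.pyRange 0 (t:Int) 1).foldl
            (fun hb i => (hb.1 + charToNum (PySem.List.pyGetD cs ((L:Int) - 1 - i) ' ') * hb.2,
                          PySem.Int.mod (hb.2 * 27) pvMOD)) ((0:Int), (1:Int))).1)
          (poly ((cs.drop (L - t)).take t)) := hh
      have := hmeq.add ((emod_self_modeq (27 ^ t)).mul_left (charToNum (cs[L - 1 - t]'(by omega))))
      calc _ = _ := this
        _ = _ := by rw [add_comm]

theorem initHB_def (cs : List Char) (L : Nat) : initHB cs (L : Int) =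
    (PySem.List.pyRange 0 (L:Int) 1).foldl
      (fun hb i => (hb.1 + charToNum (PySem.List.pyGetD cs ((L:Int) - 1 - i) ' ') * hb.2,
                    PySem.Int.mod (hb.2 * 27) pvMOD)) ((0:Int), (1:Int)) := rfl

theorem init_spec (cs : List Char) (L : Nat) (hLn : L ≤ cs.length) :
    PySem.Int.mod (initHB cs (L : Int)).1 pvMOD = hseq cs L 0 := by
  rw [PySem.Int.mod_eq_emod_of_pos pvMOD_pos, initHB_def]
  have := (init_aux cs L hLn L le_rfl).2
  simpa [hseq, Nat.sub_self] using this

theorem powMod_eq (e : Nat) : PySem.Int.powMod 27 e pvMOD = 27 ^ e % pvMOD := by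
  simp [PySem.Int.powMod, PySem.Int.mod_eq_emod_of_pos pvMOD_pos]

theorem stepA (cs : List Char) (L : Nat) (a : Int) (hL : 1 ≤ L) (ha : 1 ≤ a)
    (han : a + L ≤ cs.length) :
    PySem.Int.mod
      ((hseq cs L (a - 1).toNat - PySem.Int.powMod 27 (L - 1) pvMOD * charToNum (PySem.List.pyGetD cs (a - 1) ' ')) * 27
        + charToNum (PySem.List.pyGetD cs (a + (L : Int) - 1) ' ')) pvMOD = hseq cs L a.toNat := by
  have hg1 : PySem.List.pyGetD cs (a - 1) ' ' = cs[a.toNat - 1]'(by omega) := by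
    rw [PySem.List.pyGetD_eq_getElem cs ' ' (by omega) (by omega)]
    congr 1; omega
  have hg2 : PySem.List.pyGetD cs (a + (L : Int) - 1) ' ' = cs[a.toNat + L - 1]'(by omega) := by
    rw [PySem.List.pyGetD_eq_getElem cs ' ' (by omega) (by omega)]
    congr 1; omega
  set j := a.toNat with hj
  have hj1 : 1 ≤ j := by omega
  have hjn : j + L ≤ cs.length := by omega
  have hmid_len : ((cs.drop j).take (L - 1)).length = L - 1 := by
    simp [List.length_take, List.length_drop]; omega
  have hw0 : (cs.drop (j - 1)).take L = cs[j - 1]'(by omega) :: (cs.drop j).take (L - 1) := by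
    have h2 : j - 1 + 1 = j := by omega
    rw [List.drop_eq_getElem_cons (by omega), h2]
    have take_pred : ∀ (x : Char) (l : List Char), (x :: l).take L = x :: l.take (L - 1) := by
      intro x l
      cases L with
      | zero => omega
      | succ m => simp
    rw [take_pred]
  have hw1 : (cs.drop j).take L = (cs.drop j).take (L - 1) ++ [cs[j + L - 1]'(by omega)] := by
    have hL' : L = (L - 1) + 1 := by omega
    conv_lhs => rw [hL']
    rw [List.take_add_one]
    congr 1
    have : (cs.drop j)[L - 1]? = some (cs[j + (L - 1)]'(by omega)) := by
      rw [List.getElem?_drop]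
      exact List.getElem?_eq_getElem (by omega)
    rw [this]
    simp only [Option.toList_some]
    congr 2
    omega
  have hpw0 : poly ((cs.drop (j - 1)).take L)
      = charToNum (cs[j - 1]'(by omega)) * 27 ^ (L - 1) + poly ((cs.drop j).take (L - 1)) := by
    rw [hw0, poly_cons, hmid_len]
  have hpw1 : poly ((cs.drop j).take L)
      = poly ((cs.drop j).take (L - 1)) * 27 + charToNum (cs[j + L - 1]'(by omega)) := by
    rw [hw1, poly_append]
    simp [poly, pstep]
  rw [hg1, hg2, powMod_eq, PySem.Int.mod_eq_emod_of_pos pvMOD_pos]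
  have hat : (a - 1).toNat = j - 1 := by omega
  rw [hat]
  show _ % pvMOD = _
  unfold hseq
  have hmeq : poly ((cs.drop (j-1)).take L) % pvMOD ≡ poly ((cs.drop (j-1)).take L) [ZMOD pvMOD] :=
    emod_self_modeq _
  have hkey : ((poly ((cs.drop (j-1)).take L) % pvMOD
        - 27 ^ (L-1) % pvMOD * charToNum (cs[j - 1]'(by omega))) * 27
        + charToNum (cs[j + L - 1]'(by omega)))
      ≡ ((poly ((cs.drop (j-1)).take L)
        - 27 ^ (L-1) * charToNum (cs[j - 1]'(by omega))) * 27
        + charToNum (cs[j + L - 1]'(by omega))) [ZMOD pvMOD] :=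
    ((hmeq.sub ((emod_self_modeq _).mul_right _)).mul_right 27).add_right _
  calc _ = _ := hkey
    _ = _ := by rw [hpw0, hpw1]; ring_nf

theorem stepB (cs : List Char) (L : Nat) (a : Int) (ha : 0 ≤ a)
    (han : a + L ≤ cs.length) :
    PySem.Int.mod
      (PySem.List.pyGetD ((List.range (cs.length + 1)).map (fun k => mpoly (cs.take k))) (a + (L : Int)) 0
        - PySem.List.pyGetD ((List.range (cs.length + 1)).map (fun k => mpoly (cs.take k))) a 0
          * PySem.Int.powMod 27 L pvMOD) pvMOD = hseq cs L a.toNat := by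
  set j := a.toNat with hj
  have hjn : j + L ≤ cs.length := by omega
  have hg1 : PySem.List.pyGetD ((List.range (cs.length + 1)).map (fun k => mpoly (cs.take k))) (a + (L : Int)) 0
      = mpoly (cs.take (j + L)) := by
    rw [PySem.List.pyGetD_eq_getElem _ 0 (by omega) (by simp; omega)]
    have : (a + (L:Int)).toNat = j + L := by omega
    simp [this]
  have hg2 : PySem.List.pyGetD ((List.range (cs.length + 1)).map (fun k => mpoly (cs.take k))) a 0
      = mpoly (cs.take j) := by
    rw [PySem.List.pyGetD_eq_getElem _ 0 (by omega) (by simp; omega)]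
    simp only [List.getElem_map, List.getElem_range]
    rfl
  rw [hg1, hg2, powMod_eq, PySem.Int.mod_eq_emod_of_pos pvMOD_pos, mpoly_eq, mpoly_eq]
  show _ % pvMOD = _
  unfold hseq
  have hsplit : cs.take (j + L) = cs.take j ++ (cs.drop j).take L := List.take_add ..
  have hlenw : ((cs.drop j).take L).length = L := by
    simp [List.length_take, List.length_drop]; omega
  have hkey : (poly (cs.take (j + L)) % pvMOD - poly (cs.take j) % pvMOD * (27 ^ L % pvMOD))
      ≡ (poly (cs.take (j + L)) - poly (cs.take j) * 27 ^ L) [ZMOD pvMOD] :=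
    (emod_self_modeq _).sub ((emod_self_modeq _).mul (emod_self_modeq _))
  calc _ = _ := hkey
    _ = _ := by rw [hsplit, poly_append, hlenw]; ring_nf

theorem loopA_eq (cs : List Char) (L : Nat) (hL : 1 ≤ L) (k : Nat) :
    ∀ (a : Int) (d : PySem.Dict Int Int), 1 ≤ a → a + k ≤ (cs.length : Int) - L + 1 →
    checkLoopA cs L (PySem.Int.powMod 27 (L - 1) pvMOD)
        (PySem.List.pyRange a (a + k) 1) (hseq cs L (a - 1).toNat) d
      = scanD L ((PySem.List.pyRange a (a + k) 1).map (fun i => (i, hseq cs L i.toNat))) d := by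
  induction k with
  | zero =>
    intro a d _ _
    rw [PySem.List.pyRange_one_eq_nil (by omega)]
    rfl
  | succ k ih =>
    intro a d ha hk
    rw [PySem.List.pyRange_one_cons (by omega)]
    simp only [checkLoopA, scanD, List.map_cons]
    rw [stepA cs L a hL ha (by omega)]
    have harg : a + (k + 1 : Nat) = (a + 1) + (k : Nat) := by push_cast; ring
    cases hget : PySem.Dict.get? d (hseq cs L a.toNat) with
    | some e =>
      dsimp only
      by_cases hc : (L : Int) ≤ a - e
      · rw [if_pos hc, if_pos hc]
      · rw [if_neg hc, if_neg hc]
        have := ih (a + 1) d (by omega) (by omega)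
        rw [show (a + 1 - 1).toNat = a.toNat from by omega] at this
        rw [harg]
        exact this
    | none =>
      dsimp only
      have := ih (a + 1) (d.insert (hseq cs L a.toNat) a) (by omega) (by omega)
      rw [show (a + 1 - 1).toNat = a.toNat from by omega] at this
      rw [harg]
      exact this

theorem loopB_eq (cs : List Char) (L : Nat) (k : Nat) :
    ∀ (a : Int) (d : PySem.Dict Int Int), 0 ≤ a → a + k ≤ (cs.length : Int) - L + 1 →
    checkLoopB ((List.range (cs.length + 1)).map (fun k => mpoly (cs.take k))) L
        (PySem.Int.powMod 27 L pvMOD) (PySem.List.pyRange a (a + k) 1) d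
      = scanD L ((PySem.List.pyRange a (a + k) 1).map (fun i => (i, hseq cs L i.toNat))) d := by
  induction k with
  | zero =>
    intro a d _ _
    rw [PySem.List.pyRange_one_eq_nil (by omega)]
    rfl
  | succ k ih =>
    intro a d ha hk
    rw [PySem.List.pyRange_one_cons (by omega)]
    simp only [checkLoopB, scanD, List.map_cons]
    rw [stepB cs L a ha (by omega)]
    have harg : a + (k + 1 : Nat) = (a + 1) + (k : Nat) := by push_cast; ring
    cases hget : PySem.Dict.get? d (hseq cs L a.toNat) with
    | some e =>
      dsimp only
      by_cases hc : (L : Int) ≤ a - e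
      · rw [if_pos hc, if_pos hc]
      · rw [if_neg hc, if_neg hc, harg]
        exact ih (a + 1) d (by omega) (by omega)
    | none =>
      dsimp only
      rw [harg]; exact ih (a + 1) (d.insert (hseq cs L a.toNat) a) (by omega) (by omega)

theorem main_eq (string : String) (subLen : Int)
    (h0 : 0 ≤ subLen) (h1 : subLen ≤ PySem.Str.len string) :
    check string subLen = check_alt string subLen := by
  unfold check check_alt
  by_cases hz : subLen = 0
  · simp [hz]
  · have hbe : (subLen == 0) = false := by simp [hz]
    simp only [hbe, Bool.false_eq_true, if_false]
    set cs := string.toList with hcs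
    have hlen : PySem.Str.len string = (cs.length : Int) := by
      simp [PySem.Str.len_eq, hcs]
    set L := subLen.toNat with hLdef
    have hsub : subLen = (L : Int) := by omega
    have hL1 : 1 ≤ L := by omega
    have hLn : L ≤ cs.length := by
      rw [hlen] at h1; omega
    set n := cs.length with hn
    -- A side
    have hinit : PySem.Int.mod (initHB cs subLen).1 pvMOD = hseq cs L 0 := by
      rw [hsub]; exact init_spec cs L hLn
    have hmaxB : (subLen - 1).toNat = L - 1 := by omega
    have hendA : PySem.Str.len string - subLen + 1 = 1 + ((n - L : Nat) : Int) := by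
      rw [hlen]; omega
    have hA : checkLoopA cs subLen (PySem.Int.powMod 27 (subLen - 1).toNat pvMOD)
        (PySem.List.pyRange 1 (PySem.Str.len string - subLen + 1) 1)
        (PySem.Int.mod (initHB cs subLen).1 pvMOD)
        (PySem.Dict.empty.insert (PySem.Int.mod (initHB cs subLen).1 pvMOD) 0)
        = scanD (L : Int)
            ((PySem.List.pyRange 1 (1 + ((n - L : Nat) : Int)) 1).map (fun i => (i, hseq cs L i.toNat)))
            (PySem.Dict.empty.insert (hseq cs L 0) 0) := by
      rw [hinit, hmaxB, hendA, hsub]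
      have := loopA_eq cs L hL1 (n - L) 1 (PySem.Dict.empty.insert (hseq cs L 0) 0)
        (by omega) (by omega)
      rw [show ((1 : Int) - 1).toNat = 0 from by omega] at this
      exact this
    -- B side: the seeded first-window hash is hseq cs L 0
    have hseed : PySem.Int.mod
        (PySem.List.pyGetD ((List.range (cs.length + 1)).map (fun k => mpoly (cs.take k))) subLen 0
          - PySem.List.pyGetD ((List.range (cs.length + 1)).map (fun k => mpoly (cs.take k))) 0 0
            * PySem.Int.powMod 27 subLen.toNat pvMOD) pvMOD = hseq cs L 0 := by
      have := stepB cs L 0 le_rfl (by omega)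
      rw [zero_add] at this
      rw [hsub]
      simpa using this
    have hB : checkLoopB (cs.foldl
          (fun (s : List Int × Int) ch =>
            let acc := PySem.Int.mod (s.2 * 27 + ((ch.toNat : Int) - 96)) pvMOD
            (s.1 ++ [acc], acc)) ([0], 0)).1 subLen (PySem.Int.powMod 27 subLen.toNat pvMOD)
          (PySem.List.pyRange 1 (PySem.Str.len string - subLen + 1) 1)
          (PySem.Dict.empty.insert (PySem.Int.mod
            (PySem.List.pyGetD (cs.foldl
              (fun (s : List Int × Int) ch =>
                let acc := PySem.Int.mod (s.2 * 27 + ((ch.toNat : Int) - 96)) pvMOD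
                (s.1 ++ [acc], acc)) ([0], 0)).1 subLen 0
              - PySem.List.pyGetD (cs.foldl
                (fun (s : List Int × Int) ch =>
                  let acc := PySem.Int.mod (s.2 * 27 + ((ch.toNat : Int) - 96)) pvMOD
                  (s.1 ++ [acc], acc)) ([0], 0)).1 0 0
                * PySem.Int.powMod 27 subLen.toNat pvMOD) pvMOD) 0)
        = scanD (L : Int)
            ((PySem.List.pyRange 1 (1 + ((n - L : Nat) : Int)) 1).map (fun i => (i, hseq cs L i.toNat)))
            (PySem.Dict.empty.insert (hseq cs L 0) 0) := by
      rw [Hfold_spec cs]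
      dsimp only
      rw [hseed, hendA, hsub]
      exact loopB_eq cs L (n - L) 1 (PySem.Dict.empty.insert (hseq cs L 0) 0)
        (by omega) (by omega)
    rw [hA, hB]

-- ===== VERDICT (by name: the statement is the Claim_ definition above) =====
theorem check_spec : Claim_equal_check := by
  intro string subLen hdom hpre
  unfold Spec_check
  exact main_eq string subLen hpre.1 hpre.2
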